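-- pv_equiv track=rewrite | github.com/HCui1994/Surrender-to-Reality | Amazon/oa/oa_2018_10.py | nearestRestaurant
-- ===== SOURCE A (Python) =====
-- def nearestRestaurant(restaurants, n):
--     """
--     给出一个List，里面的数据代表每一个餐厅的坐标[x, y]。
--     顾客的坐标处于原点[0, 0]。
--     先找出n家离顾客位置最近的餐厅，然后取 n 家先出现在List中且与顾客的距离不超过 n 家离顾客最近的餐厅的最长距离。
--     返回这 n 家餐厅的坐标序列，按输入数据原始的顺序。
--     """
--     import heapq
--     if len(restaurants) < n or not restaurants:
--         return []
--     pq = []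
--     for x, y in restaurants:
--         # first loop: find max(min(distance)
--         heapq.heappush(pq, - (x**2 + y**2))
--         if len(pq) > n:  # keep heap size at n
--             heapq.heappop(pq)  # pop restaurant too far
--     max_dist = -heapq.heappop(pq)
--     res = []
--     for x, y in restaurants:
--         # second loop: get n restaurants with original seq
--         if x**2 + y ** 2 <= max_dist and n > 0:
--             res.append([x, y])
--             n -= 1
--     return res
-- ===== SOURCE B (Python) =====
-- def nearestRestaurant(restaurants, n):
--     if not restaurants or len(restaurants) < n:
--         return []
--     kth = sorted(x * x + y * y for x, y in restaurants)[n - 1]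
--     res = []
--     for x, y in restaurants:
--         if x * x + y * y <= kth:
--             res.append([x, y])
--             if len(res) == n:
--                 break
--     return res
-- ===== Notes on version B (the rewrite author's own statement) =====
-- stated objective: simpler
-- what changed: Replaced the bounded max-heap selection of the n-th nearest distance by a single full sort indexed at n-1, and the counter-guarded filtering pass by an early-exit scan that stops after n matches.
import Mathlib
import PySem

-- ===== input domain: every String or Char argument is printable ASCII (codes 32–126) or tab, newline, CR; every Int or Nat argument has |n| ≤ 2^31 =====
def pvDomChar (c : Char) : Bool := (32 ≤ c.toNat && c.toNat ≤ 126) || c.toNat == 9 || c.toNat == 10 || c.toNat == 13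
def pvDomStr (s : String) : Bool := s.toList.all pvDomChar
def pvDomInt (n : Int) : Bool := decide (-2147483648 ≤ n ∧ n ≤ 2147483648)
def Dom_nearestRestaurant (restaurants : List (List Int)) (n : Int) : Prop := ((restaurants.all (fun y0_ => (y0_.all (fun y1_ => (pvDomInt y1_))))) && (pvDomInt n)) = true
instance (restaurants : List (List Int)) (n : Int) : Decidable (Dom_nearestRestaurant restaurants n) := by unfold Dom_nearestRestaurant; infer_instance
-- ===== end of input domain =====

-- B replaces A's bounded max-heap selection of the n-th nearest squared distance by a full
-- sort indexed at n-1, and A's counter-guarded second pass by an early-exit scan (simpler).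


-- ===== PORT A =====
-- `x ** 2 + y ** 2` of an unpacked row [x, y]; rows have length 2 under Pre_ (Python raises otherwise)
def pvDistA (r : List Int) : Int :=
  match r with
  | [x, y] => x ^ 2 + y ^ 2
  | _ => 0

-- heapq modeled by the sorted order of its elements: heappush = ordered insert, heappop =
-- remove the head (the minimum). Exact for every value the Python reads off the heap
-- (only popped minima are read; the internal array layout is never observed).
def pvHeapStep (n : Int) (pq : List Int) (v : Int) : List Int :=
  let pq' := List.orderedInsert (· ≤ ·) v pq
  if n < (pq'.length : Int) then pq'.tail else pq'

def nearestRestaurant (restaurants : List (List Int)) (n : Int) : List (List Int) :=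
  if (restaurants.length : Int) < n ∨ restaurants = [] then []
  else
    let pq := restaurants.foldl (fun pq r => pvHeapStep n pq (-(pvDistA r))) []
    let maxDist := -(pq.headD 0)   -- heappop; pq is nonempty under Pre_ (n ≥ 1)
    (restaurants.foldl
      (fun (st : List (List Int) × Int) r =>
        if pvDistA r ≤ maxDist ∧ 0 < st.2 then (st.1 ++ [r], st.2 - 1) else st)
      ([], n)).1

-- ===== PORT B =====
def pvDistB (r : List Int) : Int :=
  match r with
  | [x, y] => x * x + y * y
  | _ => 0

-- the filtering loop with `if len(res) == n: break`; m is the number still wanted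
def pvCollect (kth : Int) : Int → List (List Int) → List (List Int)
  | _, [] => []
  | m, r :: rest =>
    if pvDistB r ≤ kth then
      if m = 1 then [r] else r :: pvCollect kth (m - 1) rest
    else pvCollect kth m rest

def nearestRestaurant_alt (restaurants : List (List Int)) (n : Int) : List (List Int) :=
  if restaurants = [] ∨ (restaurants.length : Int) < n then []
  else
    let kth := (PySem.List.pyGet? (PySem.List.sorted (restaurants.map pvDistB) (fun x => x) false) (n - 1)).getD 0
    pvCollect kth n restaurants

-- ===== PRECONDITION & SPEC =====
-- Pre_ excludes exactly the inputs on which the Python A raises: a nonempty list with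
-- n ≤ 0 reaching the heap phase empties the heap and heappop raises IndexError, and a
-- row that is not a coordinate pair [x, y] raises ValueError at unpacking.
def Pre_nearestRestaurant (restaurants : List (List Int)) (n : Int) : Prop :=
  restaurants = [] ∨ (restaurants.length : Int) < n ∨ (1 ≤ n ∧ ∀ r ∈ restaurants, r.length = 2)
instance (restaurants : List (List Int)) (n : Int) : Decidable (Pre_nearestRestaurant restaurants n) := by unfold Pre_nearestRestaurant; infer_instance
def pvWitness_nearestRestaurant : List (List Int) × Int := ([[1, 2], [3, 4], [0, 1]], 2)

def Spec_nearestRestaurant (restaurants : List (List Int)) (n : Int) (out : List (List Int)) : Prop := out = nearestRestaurant_alt restaurants n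
instance (restaurants : List (List Int)) (n : Int) (out : List (List Int)) : Decidable (Spec_nearestRestaurant restaurants n out) := by unfold Spec_nearestRestaurant; infer_instance

-- ===== CLAIM (what is proved, stated in full; the proofs are below) =====
def Claim_equal_nearestRestaurant : Prop := ∀ (restaurants : List (List Int)) (n : Int), Dom_nearestRestaurant restaurants n → Pre_nearestRestaurant restaurants n → Spec_nearestRestaurant restaurants n (nearestRestaurant restaurants n)

-- ===== LEMMAS AND PROOFS =====

-- abbreviation used only in the proofs: the ascending sort shared by both arguments
def pvS (l : List Int) : List Int := PySem.List.sorted l (fun x => x) false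

lemma pvDist_eq (r : List Int) : pvDistA r = pvDistB r := by
  rcases r with _ | ⟨x, _ | ⟨y, _ | ⟨z, t⟩⟩⟩ <;> simp [pvDistA, pvDistB]
  ring

lemma pvS_append (l : List Int) (v : Int) :
    pvS (l ++ [v]) = List.orderedInsert (· ≤ ·) v (pvS l) := by
  apply PySem.List.eq_of_perm_of_pairwise_le_of_injective (fun x => x) (fun a b h => h)
  · exact ((PySem.List.sorted_perm _ _ _).trans (List.perm_append_singleton _ _)).trans
      (((PySem.List.sorted_perm l _ _).symm.cons v).trans (List.perm_orderedInsert _ _ _).symm)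
  · exact PySem.List.sorted_pairwise _ _
  · exact List.Pairwise.orderedInsert v _ (PySem.List.sorted_pairwise _ _)

lemma pvS_neg (l : List Int) :
    pvS (l.map (fun d => -d)) = ((pvS l).map (fun d => -d)).reverse := by
  apply PySem.List.eq_of_perm_of_pairwise_le_of_injective (fun x => x) (fun a b h => h)
  · exact (PySem.List.sorted_perm _ _ _).trans
      (((PySem.List.sorted_perm l _ _).symm.map _).trans (List.reverse_perm _).symm)
  · exact PySem.List.sorted_pairwise _ _
  · rw [List.pairwise_reverse, List.pairwise_map]
    exact (PySem.List.sorted_pairwise l _).imp (fun h => by simp; omega)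

lemma pvS_length (l : List Int) : (pvS l).length = l.length :=
  (PySem.List.sorted_perm l _ _).length_eq

lemma pvS_pairwise (l : List Int) : (pvS l).Pairwise (· ≤ ·) :=
  PySem.List.sorted_pairwise l _

lemma pvS_nil : pvS [] = [] := by
  have := pvS_length []
  simpa using List.length_eq_zero_iff.mp (by simpa using this)

lemma pvTail_orderedInsert_drop (v : Int) (s : List Int) (k : Nat)
    (hs : s.Pairwise (· ≤ ·)) (hk : k ≤ s.length) :
    (List.orderedInsert (· ≤ ·) v (s.drop k)).tail
      = (List.orderedInsert (· ≤ ·) v s).drop (k + 1) := by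
  induction s generalizing k with
  | nil =>
    have : k = 0 := by simpa using hk
    subst this
    simp [List.orderedInsert]
  | cons a t ih =>
    cases k with
    | zero => simp [List.drop_one]
    | succ k =>
      have hk' : k ≤ t.length := by simpa using hk
      simp only [List.drop_succ_cons]
      by_cases hva : v ≤ a
      · rw [List.orderedInsert, if_pos hva]
        have hall : ∀ x ∈ t.drop k, v ≤ x := by
          intro x hx
          exact le_trans hva (List.rel_of_pairwise_cons hs (List.mem_of_mem_drop hx))
        cases hdk : t.drop k with
        | nil => simp [List.orderedInsert, hdk]
        | cons b u =>
          rw [List.orderedInsert, if_pos (hall b (by rw [hdk]; exact List.mem_cons_self))]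
          simp [← hdk]
      · rw [List.orderedInsert, if_neg hva]
        rw [List.drop_succ_cons]
        exact ih k hs.of_cons hk'

lemma pvHeap_inv (n : Int) (hn : 1 ≤ n) (vs : List Int) :
    vs.foldl (pvHeapStep n) [] = (pvS vs).drop (vs.length - n.toNat) := by
  induction vs using List.reverseRecOn with
  | nil => simp [pvS_nil]
  | append_singleton l v ih =>
    rw [List.foldl_append, List.foldl_cons, List.foldl_nil, ih]
    have hlen : (List.orderedInsert (· ≤ ·) v ((pvS l).drop (l.length - n.toNat))).length
        = (l.length - (l.length - n.toNat)) + 1 := by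
      simp [List.orderedInsert_length, pvS_length]
    unfold pvHeapStep
    simp only [hlen]
    by_cases hc : l.length < n.toNat
    · rw [if_neg (by omega)]
      have h0 : l.length - n.toNat = 0 := by omega
      have h0' : (l ++ [v]).length - n.toNat = 0 := by simp; omega
      rw [h0, h0', List.drop_zero, List.drop_zero, pvS_append]
    · rw [if_pos (by omega)]
      rw [pvTail_orderedInsert_drop v _ _ (pvS_pairwise l) (by rw [pvS_length]; omega),
        ← pvS_append]
      congr 1
      simp
      omega

lemma pvFold_zero (M : Int) (l : List (List Int)) (acc : List (List Int)) (c : Int) (hc : c ≤ 0) :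
    l.foldl (fun (st : List (List Int) × Int) r =>
        if pvDistA r ≤ M ∧ 0 < st.2 then (st.1 ++ [r], st.2 - 1) else st) (acc, c) = (acc, c) := by
  induction l with
  | nil => rfl
  | cons r t ih =>
    rw [List.foldl_cons, if_neg (by simp; omega)]
    exact ih

lemma pvFold_collect (M : Int) (l : List (List Int)) (m : Int) (acc : List (List Int)) (hm : 1 ≤ m) :
    (l.foldl (fun (st : List (List Int) × Int) r =>
        if pvDistA r ≤ M ∧ 0 < st.2 then (st.1 ++ [r], st.2 - 1) else st) (acc, m)).1
      = acc ++ pvCollect M m l := by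
  induction l generalizing m acc with
  | nil => simp [pvCollect]
  | cons r t ih =>
    rw [List.foldl_cons, pvCollect]
    by_cases hd : pvDistA r ≤ M
    · rw [if_pos ⟨hd, by omega⟩, if_pos (by rw [← pvDist_eq]; exact hd)]
      by_cases h1 : m = 1
      · rw [if_pos h1, pvFold_zero _ _ _ _ (by omega)]
      · rw [if_neg h1, ih (m - 1) (acc ++ [r]) (by omega)]
        simp
    · rw [if_neg (by simp [hd]), if_neg (by rw [← pvDist_eq]; exact hd)]
      exact ih m acc hm

-- ===== VERDICT (by name: the statement is the Claim_ definition above) =====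
theorem nearestRestaurant_spec : Claim_equal_nearestRestaurant := by
  intro restaurants n _ hpre
  unfold Spec_nearestRestaurant nearestRestaurant nearestRestaurant_alt
  by_cases hg : (restaurants.length : Int) < n ∨ restaurants = []
  · rw [if_pos hg, if_pos hg.symm]
  · have hg' : ¬ (restaurants = [] ∨ (restaurants.length : Int) < n) := fun h => hg h.symm
    rw [if_neg hg, if_neg hg']
    obtain ⟨hn, -⟩ : 1 ≤ n ∧ ∀ r ∈ restaurants, r.length = 2 := by
      rcases hpre with h | h | h
      · exact absurd (Or.inr h) hg
      · exact absurd (Or.inl h) hg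
      · exact h
    rw [not_or, not_lt] at hg
    have hlen : n ≤ (restaurants.length : Int) := hg.1
    have hN1 : 1 ≤ n.toNat := by omega
    have hNm : n.toNat ≤ restaurants.length := by omega
    -- the heap fold is a fold over the negated distances
    have hfold : restaurants.foldl (fun pq r => pvHeapStep n pq (-(pvDistA r))) []
        = ((restaurants.map pvDistB).map (fun d => -d)).foldl (pvHeapStep n) [] := by
      rw [List.foldl_map, List.foldl_map]
      congr 1
      funext pq r
      rw [pvDist_eq]
    have hM : -((restaurants.foldl (fun pq r => pvHeapStep n pq (-(pvDistA r))) []).headD 0)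
        = (PySem.List.pyGet? (PySem.List.sorted (restaurants.map pvDistB) (fun x => x) false)
            (n - 1)).getD 0 := by
      rw [hfold, pvHeap_inv n hn]
      rw [show ((restaurants.map pvDistB).map (fun d => -d)).length = restaurants.length from by simp]
      rw [pvS_neg]
      have hrl : restaurants.length - n.toNat
          < (((pvS (restaurants.map pvDistB)).map (fun d => -d)).reverse).length := by
        simp [pvS_length]
        omega
      rw [← List.getElem_cons_drop hrl, List.headD_cons, List.getElem_reverse, List.getElem_map]
      have hix : ((pvS (restaurants.map pvDistB)).map (fun d => -d)).length - 1
          - (restaurants.length - n.toNat) = n.toNat - 1 := by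
        simp [pvS_length]
        omega
      simp only [hix]
      have hn1 : n - 1 = ((n.toNat - 1 : Nat) : Int) := by omega
      rw [hn1, PySem.List.pyGet?_natCast,
        show PySem.List.sorted (restaurants.map pvDistB) (fun x => x) false
          = pvS (restaurants.map pvDistB) from rfl,
        List.getElem?_eq_getElem (show n.toNat - 1 < (pvS (restaurants.map pvDistB)).length
          by rw [pvS_length, List.length_map]; omega)]
      simp
    simp only [hM]
    rw [pvFold_collect _ restaurants n [] hn]
    simp
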